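-- pv_equiv track=rewrite | github.com/pypi-data/pypi-mirror-99 | packages/eve-viz/eve-viz-0.0b13.tar.gz/eve-viz-0.0b13/Eve/split/_split.py | time_denominator
-- ===== SOURCE A (Python) =====
-- def time_denominator(time_inputs):
--     """
--     0 - seconds
--     1 - minutes
--     2 - hours
--     3 - days
--     4 - months
--     5 - numeric
--     """
--     denom = 99
--
--     for time_input in time_inputs:
--
--         if isinstance(time_input, str):
--
--             if 'seconds' in time_input:
--                 cur_denom = 0
--                 denom = min(cur_denom, denom)
--
--             elif 'minutes' in time_input:
--                 cur_denom = 1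
--                 denom = min(cur_denom, denom)
--
--             elif 'hours' in time_input:
--                 cur_denom = 2
--                 denom = min(cur_denom, denom)
--
--             elif 'days' in time_input:
--                 cur_denom = 3
--                 denom = min(cur_denom, denom)
--
--             elif 'months' in time_input:
--                 cur_denom = 4
--                 denom = min(cur_denom, denom)
--
--     if denom==0:
--         return 's'
--     elif denom==1:
--         return 'min'
--     elif denom==2:
--         return 'H'
--     elif denom==3:
--         return 'd'
--     elif denom==4:
--         return 'd'
--     else:
--         return None
-- ===== SOURCE B (Python) =====
-- def time_denominator(time_inputs):
--     for keyword, label in [('seconds', 's'), ('minutes', 'min'),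
--                            ('hours', 'H'), ('days', 'd'), ('months', 'd')]:
--         if any(isinstance(t, str) and keyword in t for t in time_inputs):
--             return label
--     return None
-- ===== Notes on version B (the rewrite author's own statement) =====
-- stated objective: simpler
-- what changed: Replaces the single pass that maintains a running minimum denominator with an outer loop over an ordered (keyword,label) table that returns the first keyword contained in any input, removing the numeric encode/decode step.
import Mathlib
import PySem

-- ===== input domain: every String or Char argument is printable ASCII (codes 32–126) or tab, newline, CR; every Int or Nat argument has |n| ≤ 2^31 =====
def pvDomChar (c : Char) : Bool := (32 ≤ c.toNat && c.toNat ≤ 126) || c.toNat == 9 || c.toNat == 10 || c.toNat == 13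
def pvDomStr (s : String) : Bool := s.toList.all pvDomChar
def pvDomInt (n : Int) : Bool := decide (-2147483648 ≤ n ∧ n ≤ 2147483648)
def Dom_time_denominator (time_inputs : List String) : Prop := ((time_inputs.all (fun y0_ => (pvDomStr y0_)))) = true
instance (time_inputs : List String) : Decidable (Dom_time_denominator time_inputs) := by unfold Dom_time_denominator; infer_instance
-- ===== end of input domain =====

-- B replaces A's running-minimum pass over the inputs by a priority loop over an ordered
-- (keyword,label) table, returning on the first keyword contained in any input (objective: simpler).


-- ===== PORT A =====
-- one iteration of A's loop body (the isinstance(str) test is always true: inputs are strings)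
def tdStep (denom : Int) (time_input : String) : Int :=
  if PySem.Str.isIn "seconds" time_input then min 0 denom
  else if PySem.Str.isIn "minutes" time_input then min 1 denom
  else if PySem.Str.isIn "hours" time_input then min 2 denom
  else if PySem.Str.isIn "days" time_input then min 3 denom
  else if PySem.Str.isIn "months" time_input then min 4 denom
  else denom

def time_denominator (time_inputs : List String) : Option String :=
  let denom := time_inputs.foldl tdStep 99
  if denom = 0 then some "s"
  else if denom = 1 then some "min"
  else if denom = 2 then some "H"
  else if denom = 3 then some "d"
  else if denom = 4 then some "d"
  else none

-- ===== PORT B =====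
-- outer loop of B over the (keyword, label) table; inner any(...) scan over the inputs
def tdTableLoop (time_inputs : List String) : List (String × String) → Option String
  | [] => none
  | (keyword, label) :: rest =>
      if time_inputs.any (fun t => PySem.Str.isIn keyword t) then some label
      else tdTableLoop time_inputs rest

def time_denominator_alt (time_inputs : List String) : Option String :=
  tdTableLoop time_inputs
    [("seconds", "s"), ("minutes", "min"), ("hours", "H"), ("days", "d"), ("months", "d")]

-- ===== PRECONDITION & SPEC =====
def Spec_time_denominator (time_inputs : List String) (out : Option String) : Prop := out = time_denominator_alt time_inputs
instance (time_inputs : List String) (out : Option String) : Decidable (Spec_time_denominator time_inputs out) := by unfold Spec_time_denominator; infer_instance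

-- ===== CLAIM (what is proved, stated in full; the proofs are below) =====
def Claim_equal_time_denominator : Prop := ∀ (time_inputs : List String), Dom_time_denominator time_inputs → Spec_time_denominator time_inputs (time_denominator time_inputs)

-- ===== LEMMAS AND PROOFS =====

-- the per-string denominator A assigns (99 if the string mentions no unit)
def tdSval (t : String) : Int :=
  if PySem.Str.isIn "seconds" t then 0
  else if PySem.Str.isIn "minutes" t then 1
  else if PySem.Str.isIn "hours" t then 2
  else if PySem.Str.isIn "days" t then 3
  else if PySem.Str.isIn "months" t then 4
  else 99

theorem tdSval_bounds (t : String) : 0 ≤ tdSval t ∧ tdSval t ≤ 99 := by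
  simp only [tdSval]; split_ifs <;> omega

theorem tdStep_eq_min (d : Int) (t : String) (hd : d ≤ 99) : tdStep d t = min d (tdSval t) := by
  simp only [tdStep, tdSval]; split_ifs <;> omega

theorem tdM_bounds (ts : List String) :
    ∀ d : Int, 0 ≤ d → d ≤ 99 → 0 ≤ ts.foldl tdStep d ∧ ts.foldl tdStep d ≤ 99 := by
  induction ts with
  | nil => intro d h0 h1; simpa using ⟨h0, h1⟩
  | cons t ts ih =>
      intro d h0 h1
      have hs := tdSval_bounds t
      simp only [List.foldl_cons, tdStep_eq_min d t h1]
      exact ih _ (by omega) (by omega)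

theorem td_foldl_min (ts : List String) :
    ∀ d : Int, 0 ≤ d → d ≤ 99 → ts.foldl tdStep d = min d (ts.foldl tdStep 99) := by
  induction ts with
  | nil => intro d _ h1; simp; omega
  | cons t ts ih =>
      intro d h0 h1
      have hs := tdSval_bounds t
      have hb := tdM_bounds ts 99 (by omega) (by omega)
      simp only [List.foldl_cons, tdStep_eq_min d t h1, tdStep_eq_min 99 t (by omega)]
      rw [ih (min d (tdSval t)) (by omega) (by omega),
          ih (min 99 (tdSval t)) (by omega) (by omega)]
      omega

theorem tdSval_le_0 (t : String) : tdSval t ≤ 0 ↔ (PySem.Str.isIn "seconds" t) = true := by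
  simp only [tdSval]; split_ifs <;> simp_all

theorem tdSval_le_1 (t : String) : tdSval t ≤ 1 ↔ (PySem.Str.isIn "seconds" t || PySem.Str.isIn "minutes" t) = true := by
  simp only [tdSval]; split_ifs <;> simp_all

theorem tdSval_le_2 (t : String) : tdSval t ≤ 2 ↔ (PySem.Str.isIn "seconds" t || PySem.Str.isIn "minutes" t || PySem.Str.isIn "hours" t) = true := by
  simp only [tdSval]; split_ifs <;> simp_all

theorem tdSval_le_3 (t : String) : tdSval t ≤ 3 ↔ (PySem.Str.isIn "seconds" t || PySem.Str.isIn "minutes" t || PySem.Str.isIn "hours" t || PySem.Str.isIn "days" t) = true := by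
  simp only [tdSval]; split_ifs <;> simp_all

theorem tdSval_le_4 (t : String) : tdSval t ≤ 4 ↔ (PySem.Str.isIn "seconds" t || PySem.Str.isIn "minutes" t || PySem.Str.isIn "hours" t || PySem.Str.isIn "days" t || PySem.Str.isIn "months" t) = true := by
  simp only [tdSval]; split_ifs <;> simp_all

-- the fold is ≤ 0 iff some input mentions a unit of priority ≤ 0
theorem td_level_0 (ts : List String) :
    ts.foldl tdStep 99 ≤ 0 ↔ ((ts.any fun t => PySem.Str.isIn "seconds" t)) = true := by
  induction ts with
  | nil => simp
  | cons t ts ih =>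
      have hs := tdSval_bounds t
      have hb := tdM_bounds ts 99 (by omega) (by omega)
      simp only [List.foldl_cons, tdStep_eq_min 99 t (by omega)]
      rw [td_foldl_min ts (min 99 (tdSval t)) (by omega) (by omega)]
      have harith : min (min 99 (tdSval t)) (ts.foldl tdStep 99) ≤ 0 ↔
          (tdSval t ≤ 0 ∨ ts.foldl tdStep 99 ≤ 0) := by omega
      rw [harith, tdSval_le_0 t, ih]
      simp only [List.any_cons]
      generalize (PySem.Str.isIn "seconds" t : Bool) = a0
      generalize ((ts.any fun t => PySem.Str.isIn "seconds" t) : Bool) = b0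
      revert a0 b0
      decide

-- the fold is ≤ 1 iff some input mentions a unit of priority ≤ 1
theorem td_level_1 (ts : List String) :
    ts.foldl tdStep 99 ≤ 1 ↔ ((ts.any fun t => PySem.Str.isIn "seconds" t) || (ts.any fun t => PySem.Str.isIn "minutes" t)) = true := by
  induction ts with
  | nil => simp
  | cons t ts ih =>
      have hs := tdSval_bounds t
      have hb := tdM_bounds ts 99 (by omega) (by omega)
      simp only [List.foldl_cons, tdStep_eq_min 99 t (by omega)]
      rw [td_foldl_min ts (min 99 (tdSval t)) (by omega) (by omega)]
      have harith : min (min 99 (tdSval t)) (ts.foldl tdStep 99) ≤ 1 ↔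
          (tdSval t ≤ 1 ∨ ts.foldl tdStep 99 ≤ 1) := by omega
      rw [harith, tdSval_le_1 t, ih]
      simp only [List.any_cons]
      generalize (PySem.Str.isIn "seconds" t : Bool) = a0
      generalize (PySem.Str.isIn "minutes" t : Bool) = a1
      generalize ((ts.any fun t => PySem.Str.isIn "seconds" t) : Bool) = b0
      generalize ((ts.any fun t => PySem.Str.isIn "minutes" t) : Bool) = b1
      revert a0 a1 b0 b1
      decide

-- the fold is ≤ 2 iff some input mentions a unit of priority ≤ 2
theorem td_level_2 (ts : List String) :
    ts.foldl tdStep 99 ≤ 2 ↔ ((ts.any fun t => PySem.Str.isIn "seconds" t) || (ts.any fun t => PySem.Str.isIn "minutes" t) || (ts.any fun t => PySem.Str.isIn "hours" t)) = true := by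
  induction ts with
  | nil => simp
  | cons t ts ih =>
      have hs := tdSval_bounds t
      have hb := tdM_bounds ts 99 (by omega) (by omega)
      simp only [List.foldl_cons, tdStep_eq_min 99 t (by omega)]
      rw [td_foldl_min ts (min 99 (tdSval t)) (by omega) (by omega)]
      have harith : min (min 99 (tdSval t)) (ts.foldl tdStep 99) ≤ 2 ↔
          (tdSval t ≤ 2 ∨ ts.foldl tdStep 99 ≤ 2) := by omega
      rw [harith, tdSval_le_2 t, ih]
      simp only [List.any_cons]
      generalize (PySem.Str.isIn "seconds" t : Bool) = a0
      generalize (PySem.Str.isIn "minutes" t : Bool) = a1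
      generalize (PySem.Str.isIn "hours" t : Bool) = a2
      generalize ((ts.any fun t => PySem.Str.isIn "seconds" t) : Bool) = b0
      generalize ((ts.any fun t => PySem.Str.isIn "minutes" t) : Bool) = b1
      generalize ((ts.any fun t => PySem.Str.isIn "hours" t) : Bool) = b2
      revert a0 a1 a2 b0 b1 b2
      decide

-- the fold is ≤ 3 iff some input mentions a unit of priority ≤ 3
theorem td_level_3 (ts : List String) :
    ts.foldl tdStep 99 ≤ 3 ↔ ((ts.any fun t => PySem.Str.isIn "seconds" t) || (ts.any fun t => PySem.Str.isIn "minutes" t) || (ts.any fun t => PySem.Str.isIn "hours" t) || (ts.any fun t => PySem.Str.isIn "days" t)) = true := by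
  induction ts with
  | nil => simp
  | cons t ts ih =>
      have hs := tdSval_bounds t
      have hb := tdM_bounds ts 99 (by omega) (by omega)
      simp only [List.foldl_cons, tdStep_eq_min 99 t (by omega)]
      rw [td_foldl_min ts (min 99 (tdSval t)) (by omega) (by omega)]
      have harith : min (min 99 (tdSval t)) (ts.foldl tdStep 99) ≤ 3 ↔
          (tdSval t ≤ 3 ∨ ts.foldl tdStep 99 ≤ 3) := by omega
      rw [harith, tdSval_le_3 t, ih]
      simp only [List.any_cons]
      generalize (PySem.Str.isIn "seconds" t : Bool) = a0
      generalize (PySem.Str.isIn "minutes" t : Bool) = a1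
      generalize (PySem.Str.isIn "hours" t : Bool) = a2
      generalize (PySem.Str.isIn "days" t : Bool) = a3
      generalize ((ts.any fun t => PySem.Str.isIn "seconds" t) : Bool) = b0
      generalize ((ts.any fun t => PySem.Str.isIn "minutes" t) : Bool) = b1
      generalize ((ts.any fun t => PySem.Str.isIn "hours" t) : Bool) = b2
      generalize ((ts.any fun t => PySem.Str.isIn "days" t) : Bool) = b3
      revert a0 a1 a2 a3 b0 b1 b2 b3
      decide

-- the fold is ≤ 4 iff some input mentions a unit of priority ≤ 4
theorem td_level_4 (ts : List String) :
    ts.foldl tdStep 99 ≤ 4 ↔ ((ts.any fun t => PySem.Str.isIn "seconds" t) || (ts.any fun t => PySem.Str.isIn "minutes" t) || (ts.any fun t => PySem.Str.isIn "hours" t) || (ts.any fun t => PySem.Str.isIn "days" t) || (ts.any fun t => PySem.Str.isIn "months" t)) = true := by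
  induction ts with
  | nil => simp
  | cons t ts ih =>
      have hs := tdSval_bounds t
      have hb := tdM_bounds ts 99 (by omega) (by omega)
      simp only [List.foldl_cons, tdStep_eq_min 99 t (by omega)]
      rw [td_foldl_min ts (min 99 (tdSval t)) (by omega) (by omega)]
      have harith : min (min 99 (tdSval t)) (ts.foldl tdStep 99) ≤ 4 ↔
          (tdSval t ≤ 4 ∨ ts.foldl tdStep 99 ≤ 4) := by omega
      rw [harith, tdSval_le_4 t, ih]
      simp only [List.any_cons]
      generalize (PySem.Str.isIn "seconds" t : Bool) = a0
      generalize (PySem.Str.isIn "minutes" t : Bool) = a1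
      generalize (PySem.Str.isIn "hours" t : Bool) = a2
      generalize (PySem.Str.isIn "days" t : Bool) = a3
      generalize (PySem.Str.isIn "months" t : Bool) = a4
      generalize ((ts.any fun t => PySem.Str.isIn "seconds" t) : Bool) = b0
      generalize ((ts.any fun t => PySem.Str.isIn "minutes" t) : Bool) = b1
      generalize ((ts.any fun t => PySem.Str.isIn "hours" t) : Bool) = b2
      generalize ((ts.any fun t => PySem.Str.isIn "days" t) : Bool) = b3
      generalize ((ts.any fun t => PySem.Str.isIn "months" t) : Bool) = b4
      revert a0 a1 a2 a3 a4 b0 b1 b2 b3 b4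
      decide

-- the fold either stays at its seed or drops to a unit value ≤ 4
theorem td_val_cases (ts : List String) : ∀ d : Int, ts.foldl tdStep d = d ∨ ts.foldl tdStep d ≤ 4 := by
  induction ts with
  | nil => intro d; left; rfl
  | cons t ts ih =>
      intro d
      simp only [List.foldl_cons]
      rcases ih (tdStep d t) with h | h
      · rw [h]; simp only [tdStep]; split_ifs <;> omega
      · right; exact h

-- the closed form of A's fold as an if-chain over the five any-scans
def tdChain (ts : List String) : Int :=
  if (ts.any fun t => PySem.Str.isIn "seconds" t) then 0
  else if (ts.any fun t => PySem.Str.isIn "minutes" t) then 1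
  else if (ts.any fun t => PySem.Str.isIn "hours" t) then 2
  else if (ts.any fun t => PySem.Str.isIn "days" t) then 3
  else if (ts.any fun t => PySem.Str.isIn "months" t) then 4
  else 99

theorem td_foldl_eq_chain (ts : List String) : ts.foldl tdStep 99 = tdChain ts := by
  have l0 := td_level_0 ts
  have l1 := td_level_1 ts
  have l2 := td_level_2 ts
  have l3 := td_level_3 ts
  have l4 := td_level_4 ts
  have hb := tdM_bounds ts 99 (by omega) (by omega)
  simp only [Bool.or_eq_true] at l0 l1 l2 l3 l4
  simp only [tdChain]
  split_ifs with h1 h2 h3 h4 h5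
  · have hle := l0.mpr h1; omega
  · have hle := l1.mpr (Or.inr h2)
    have h0 : ¬ ts.foldl tdStep 99 ≤ 0 := fun hf => by
      rcases l0.mp hf with h
      exacts [h1 h]
    omega
  · have hle := l2.mpr (Or.inr h3)
    have h0 : ¬ ts.foldl tdStep 99 ≤ 1 := fun hf => by
      rcases l1.mp hf with (h | h)
      exacts [h1 h, h2 h]
    omega
  · have hle := l3.mpr (Or.inr h4)
    have h0 : ¬ ts.foldl tdStep 99 ≤ 2 := fun hf => by
      rcases l2.mp hf with ((h | h) | h)
      exacts [h1 h, h2 h, h3 h]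
    omega
  · have hle := l4.mpr (Or.inr h5)
    have h0 : ¬ ts.foldl tdStep 99 ≤ 3 := fun hf => by
      rcases l3.mp hf with (((h | h) | h) | h)
      exacts [h1 h, h2 h, h3 h, h4 h]
    omega
  · have h0 : ¬ ts.foldl tdStep 99 ≤ 4 := fun hf => by
      rcases l4.mp hf with ((((h | h) | h) | h) | h)
      exacts [h1 h, h2 h, h3 h, h4 h, h5 h]
    rcases td_val_cases ts 99 with hc | hc <;> omega

theorem time_denominator_eq (ts : List String) :
    time_denominator ts = time_denominator_alt ts := by
  unfold time_denominator time_denominator_alt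
  simp only [tdTableLoop]
  rw [td_foldl_eq_chain]
  simp only [tdChain]
  split_ifs <;> first | rfl | omega

-- ===== VERDICT (by name: the statement is the Claim_ definition above) =====
theorem time_denominator_spec : Claim_equal_time_denominator := by
  intro ts _
  exact time_denominator_eq ts
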